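-- pv_equiv track=rewrite | github.com/yuuun/algo | baekjoon/7569.py | print_val
-- ===== SOURCE A (Python) =====
-- def print_val(adj):
--     max_val = 0
--     for ad in adj:
--         for a in ad:
--             if 0 in a:
--                 return -1
--             for i in a:
--                 if max_val < i:
--                     max_val = i
--     return max_val - 1
-- ===== SOURCE B (Python) =====
-- def print_val(adj):
--     flat = [x for ad in adj for a in ad for x in a]
--
--     def solve(lo, hi):
--         # divide and conquer on flat[lo:hi]:
--         # returns None if a zero is present, else max of the segment's elements and 0
--         if hi - lo == 0:
--             return 0
--         if hi - lo == 1: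
--             x = flat[lo]
--             return None if x == 0 else max(x, 0)
--         mid = (lo + hi) // 2
--         left = solve(lo, mid)
--         right = solve(mid, hi)
--         return None if left is None or right is None else max(left, right)
--
--     res = solve(0, len(flat))
--     return -1 if res is None else res - 1
-- ===== Notes on version B (the rewrite author's own statement) =====
-- stated objective: alternative
-- what changed: Replaces the interleaved nested-loop scan (running max with early return on a zero) by flattening once and a recursive divide-and-conquer over index ranges that combines Option results (None = zero seen, else segment max joined with max).
import Mathlib
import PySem

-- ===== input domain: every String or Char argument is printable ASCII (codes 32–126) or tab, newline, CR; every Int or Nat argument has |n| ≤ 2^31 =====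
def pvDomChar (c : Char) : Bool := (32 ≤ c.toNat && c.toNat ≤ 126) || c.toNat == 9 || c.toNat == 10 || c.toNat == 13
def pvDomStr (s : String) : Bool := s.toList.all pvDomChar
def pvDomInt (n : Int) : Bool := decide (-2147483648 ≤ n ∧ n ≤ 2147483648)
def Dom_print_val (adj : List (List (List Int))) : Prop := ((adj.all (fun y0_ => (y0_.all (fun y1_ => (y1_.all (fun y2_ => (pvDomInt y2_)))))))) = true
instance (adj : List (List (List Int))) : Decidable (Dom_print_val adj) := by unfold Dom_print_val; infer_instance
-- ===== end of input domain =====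

-- B flattens once, then finds the answer by recursive divide-and-conquer over index ranges
-- instead of A's interleaved nested-loop scan; same values, a different algorithmic shape.

-- ===== PORT A =====
-- inner loop: 'for i in a: if max_val < i: max_val = i'
def pvA_inner (a : List Int) (m : Int) : Int :=
  a.foldl (fun m i => if m < i then i else m) m

-- middle loop over rows of one slab; none = early 'return -1'
def pvA_rows (ad : List (List Int)) (m : Int) : Option Int :=
  match ad with
  | [] => some m
  | a :: rest => if a.contains 0 then none else pvA_rows rest (pvA_inner a m)

-- outer loop over slabs
def pvA_slabs (adj : List (List (List Int))) (m : Int) : Option Int :=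
  match adj with
  | [] => some m
  | ad :: rest =>
    match pvA_rows ad m with
    | none => none
    | some m' => pvA_slabs rest m'

def print_val (adj : List (List (List Int))) : Int :=
  match pvA_slabs adj 0 with
  | none => -1
  | some m => m - 1

-- ===== PORT B =====
-- solve(lo, hi): None if a zero occurs in flat[lo:hi], else max of that segment and 0.
-- flat[lo] is ported with pyGet? (in range whenever 0 ≤ lo < hi ≤ len(flat), as in every call).
def pvB_solve (flat : List Int) (lo hi : Nat) : Option Int :=
  if hi - lo = 0 then some 0
  else if hi - lo = 1 then
    let x := (PySem.List.pyGet? flat (lo : Int)).getD 0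
    if x = 0 then none else some (max x 0)
  else
    let mid := (lo + hi) / 2
    match pvB_solve flat lo mid, pvB_solve flat mid hi with
    | some l, some r => some (max l r)
    | _, _ => none
termination_by hi - lo
decreasing_by all_goals omega

def print_val_alt (adj : List (List (List Int))) : Int :=
  let flat := adj.flatMap (fun ad => ad.flatMap (fun a => a))
  match pvB_solve flat 0 flat.length with
  | none => -1
  | some r => r - 1

-- ===== PRECONDITION & SPEC =====
def Spec_print_val (adj : List (List (List Int))) (out : Int) : Prop := out = print_val_alt adj
instance (adj : List (List (List Int))) (out : Int) : Decidable (Spec_print_val adj out) := by unfold Spec_print_val; infer_instance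

-- ===== CLAIM (what is proved, stated in full; the proofs are below) =====
def Claim_equal_print_val : Prop := ∀ (adj : List (List (List Int))), Dom_print_val adj → Spec_print_val adj (print_val adj)

-- ===== LEMMAS AND PROOFS =====

theorem pvA_inner_eq_foldl_max (a : List Int) (m : Int) :
    pvA_inner a m = a.foldl max m := by
  unfold pvA_inner
  congr 1
  funext x y
  simp [max_def]
  split_ifs <;> omega

theorem pvA_rows_char (ad : List (List Int)) (m : Int) :
    pvA_rows ad m =
      if 0 ∈ ad.flatMap (fun a => a) then none
      else some ((ad.flatMap (fun a => a)).foldl max m) := by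
  induction ad generalizing m with
  | nil => simp [pvA_rows]
  | cons a rest ih =>
    by_cases h : 0 ∈ a
    · rw [List.flatMap_cons, if_pos (List.mem_append_left _ h)]
      simp [pvA_rows, h]
    · have hc : (a.contains 0) = false := by simpa using h
      rw [List.flatMap_cons]
      unfold pvA_rows
      rw [hc]
      simp only [Bool.false_eq_true, if_false, ih, pvA_inner_eq_foldl_max,
        List.foldl_append, List.mem_append]
      have : (0 ∈ a ∨ 0 ∈ rest.flatMap fun a => a) ↔ (0 ∈ rest.flatMap fun a => a) := by
        tauto
      rw [if_congr this rfl rfl]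

theorem pvA_slabs_char (adj : List (List (List Int))) (m : Int) :
    pvA_slabs adj m =
      (if 0 ∈ adj.flatMap (fun ad => ad.flatMap (fun a => a)) then none
       else some ((adj.flatMap (fun ad => ad.flatMap (fun a => a))).foldl max m)) := by
  induction adj generalizing m with
  | nil => simp [pvA_slabs]
  | cons ad rest ih =>
    rw [List.flatMap_cons]
    unfold pvA_slabs
    rw [pvA_rows_char]
    by_cases h : 0 ∈ ad.flatMap (fun a => a)
    · rw [if_pos h, if_pos (List.mem_append_left _ h)]
    · rw [if_neg h]
      show pvA_slabs rest (List.foldl max m (ad.flatMap (fun a => a))) = _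
      rw [ih]
      simp only [List.foldl_append, List.mem_append]
      have : (0 ∈ ad.flatMap fun a => a) ∨ (0 ∈ rest.flatMap fun ad => ad.flatMap fun a => a) ↔
          (0 ∈ rest.flatMap fun ad => ad.flatMap fun a => a) := by tauto
      rw [if_congr this rfl rfl]

theorem foldl_max_pull (xs : List Int) (a b : Int) :
    List.foldl max (max a b) xs = max a (List.foldl max b xs) := by
  induction xs generalizing b with
  | nil => simp
  | cons x t ih => simp [List.foldl, max_assoc, ih]

theorem foldl_max_init_le (xs : List Int) (b : Int) : b ≤ xs.foldl max b := by
  induction xs generalizing b with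
  | nil => simp
  | cons x t ih => exact le_trans (le_max_left b x) (ih (max b x))

theorem foldl_max_append_zero (s t : List Int) :
    (s ++ t).foldl max 0 = max (s.foldl max 0) (t.foldl max 0) := by
  rw [List.foldl_append]
  have h0 : (0 : Int) ≤ s.foldl max 0 := foldl_max_init_le s 0
  calc List.foldl max (s.foldl max 0) t
      = List.foldl max (max (s.foldl max 0) 0) t := by rw [max_eq_left h0]
    _ = max (s.foldl max 0) (t.foldl max 0) := foldl_max_pull t _ 0

theorem pvB_solve_char (flat : List Int) :
    ∀ (n lo hi : Nat), hi - lo = n → lo ≤ hi → hi ≤ flat.length →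
      pvB_solve flat lo hi =
        (if 0 ∈ (flat.drop lo).take (hi - lo) then none
         else some (((flat.drop lo).take (hi - lo)).foldl max 0)) := by
  intro n
  induction n using Nat.strong_induction_on with
  | _ n ih =>
    intro lo hi hn hle hlen
    match n, hn with
    | 0, hn =>
      unfold pvB_solve
      rw [if_pos hn, hn]
      simp
    | 1, hn =>
      have hlt : lo < flat.length := by omega
      unfold pvB_solve
      rw [if_neg (by omega), if_pos hn, hn]
      have hseg : (flat.drop lo).take 1 = [flat[lo]] := by
        rw [List.drop_eq_getElem_cons hlt, List.take_succ_cons, List.take_zero]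
      rw [hseg]
      have hget : PySem.List.pyGet? flat (lo : Int) = some flat[lo] := by
        rw [PySem.List.pyGet?_natCast, List.getElem?_eq_getElem hlt]
      simp only [hget, Option.getD_some]
      by_cases h0 : flat[lo] = (0 : Int)
      · simp [h0]
      · simp only [h0, if_false, List.mem_singleton]
        rw [if_neg (fun h => h0 h.symm)]
        simp [List.foldl, max_comm]
    | (k+2), hn =>
      unfold pvB_solve
      rw [if_neg (by omega), if_neg (by omega)]
      have hmidlo : lo < (lo + hi) / 2 := by omega
      have hmidhi : (lo + hi) / 2 < hi := by omega
      set mid := (lo + hi) / 2 with hmid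
      have hL := ih (mid - lo) (by omega) lo mid rfl (by omega) (by omega)
      have hR := ih (hi - mid) (by omega) mid hi rfl (by omega) hlen
      have hsplit : (flat.drop lo).take (hi - lo)
          = (flat.drop lo).take (mid - lo) ++ (flat.drop mid).take (hi - mid) := by
        have h1 : hi - lo = (mid - lo) + (hi - mid) := by omega
        rw [h1, List.take_add]
        congr 2
        rw [List.drop_drop]
        congr 1
        omega
      show (match pvB_solve flat lo mid, pvB_solve flat mid hi with
        | some l, some r => some (max l r)
        | _, _ => none) = _
      rw [hL, hR, hsplit]
      by_cases h1 : 0 ∈ (flat.drop lo).take (mid - lo) <;>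
        by_cases h2 : 0 ∈ (flat.drop mid).take (hi - mid) <;>
        simp [h1, h2]
      rw [← List.foldl_append, foldl_max_append_zero]

-- ===== VERDICT (by name: the statement is the Claim_ definition above) =====
theorem print_val_spec : Claim_equal_print_val := by
  intro adj _
  unfold Spec_print_val print_val print_val_alt
  rw [pvA_slabs_char]
  have hB := pvB_solve_char (adj.flatMap (fun ad => ad.flatMap (fun a => a)))
    (adj.flatMap (fun ad => ad.flatMap (fun a => a))).length 0
    (adj.flatMap (fun ad => ad.flatMap (fun a => a))).length rfl (Nat.zero_le _) le_rfl
  simp only [List.drop_zero, Nat.sub_zero, List.take_length] at hB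
  simp only [hB]
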